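-- pv_equiv track=rewrite | github.com/Hanryangjin/transformer | kogector/train_one_head.py | _collapse_composite_label
-- ===== SOURCE A (Python) =====
-- def _prefix_fix_raw_label(s: str) -> str:
--     """원형 라벨 보존. 전처리 잔재 보정만 수행: APPEND_→INSERT_, REPLACE/INSERT 언더스코어 보정."""
--     if not isinstance(s, str):
--         return s
--     s = s.strip()
--     if s.startswith("APPEND_"):
--         s = s.replace("APPEND_", "INSERT_", 1)
--     if s.startswith("REPLACE") and not s.startswith("REPLACE_"):
--         s = s.replace("REPLACE", "REPLACE_", 1)
--     if s.startswith("INSERT") and not s.startswith("INSERT_"):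
--         s = s.replace("INSERT", "INSERT_", 1)
--     return s
--
-- def _collapse_composite_label(s: str) -> str:
--     """
--     방법1: 복합 태그를 단일 의미 태그로 축약.
--     우선순위: REPLACE_* > INSERT_*/APPEND_* > DELETE > KEEP
--     """
--     if not isinstance(s, str) or "|" not in s:
--         return s
--     parts = [p.strip() for p in s.split("|") if p.strip()]
--     # REPLACE 우선
--     for p in parts:
--         if p.startswith("REPLACE_") or p.startswith("REPLACE"):
--             return _prefix_fix_raw_label(p)
--     # INSERT/APPEND 다음
--     for p in parts:
--         if p.startswith("APPEND_"):
--             return _prefix_fix_raw_label(p)  # 위에서 INSERT_로 바뀜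
--         if p.startswith("INSERT_") or p.startswith("INSERT"):
--             return _prefix_fix_raw_label(p)
--     # DELETE
--     if "DELETE" in parts:
--         return "DELETE"
--     # KEEP
--     if "KEEP" in parts:
--         return "KEEP"
--     # fallback: 첫 파트 보정
--     return _prefix_fix_raw_label(parts[0])
-- ===== SOURCE B (Python) =====
-- def _prefix_fix_raw_label(s: str) -> str:
--     if not isinstance(s, str):
--         return s
--     s = s.strip()
--     if s.startswith("APPEND_"):
--         s = s.replace("APPEND_", "INSERT_", 1)
--     if s.startswith("REPLACE") and not s.startswith("REPLACE_"):
--         s = s.replace("REPLACE", "REPLACE_", 1)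
--     if s.startswith("INSERT") and not s.startswith("INSERT_"):
--         s = s.replace("INSERT", "INSERT_", 1)
--     return s
--
-- def _priority(p: str) -> int:
--     if p.startswith("REPLACE"):
--         return 4
--     if p.startswith("APPEND_") or p.startswith("INSERT"):
--         return 3
--     if p == "DELETE":
--         return 2
--     if p == "KEEP":
--         return 1
--     return 0
--
-- def _collapse_composite_label(s: str) -> str:
--     if not isinstance(s, str) or "|" not in s:
--         return s
--     parts = [p.strip() for p in s.split("|") if p.strip()]
--     best = parts[0]
--     for p in parts[1:]:
--         if _priority(best) < _priority(p):
--             best = p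
--     return _prefix_fix_raw_label(best)
-- ===== Notes on version B (the rewrite author's own statement) =====
-- stated objective: simpler
-- what changed: A's four sequential phases (REPLACE scan, INSERT/APPEND scan, DELETE/KEEP membership tests, fallback) are replaced by a single pass that keeps the first part of maximal priority and fixes it once.
import Mathlib
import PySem

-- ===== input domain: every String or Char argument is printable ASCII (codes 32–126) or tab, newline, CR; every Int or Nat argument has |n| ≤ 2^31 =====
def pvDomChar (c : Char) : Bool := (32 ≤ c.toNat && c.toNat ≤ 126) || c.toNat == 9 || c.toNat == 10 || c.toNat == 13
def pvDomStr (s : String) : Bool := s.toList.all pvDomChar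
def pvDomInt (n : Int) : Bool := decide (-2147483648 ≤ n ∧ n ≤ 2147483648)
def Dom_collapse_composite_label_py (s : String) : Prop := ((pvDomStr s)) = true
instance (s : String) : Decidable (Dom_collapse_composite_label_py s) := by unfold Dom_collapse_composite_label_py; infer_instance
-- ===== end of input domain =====

-- B replaces A's four sequential scans (REPLACE pass, INSERT/APPEND pass, DELETE/KEEP membership tests,
-- fallback) by ONE pass tracking the first part of maximal priority; objective: simpler (single loop).

-- ===== PORT A =====

-- s.replace(old, new, 1): replace the FIRST occurrence of old (exact hand port of CPython's
-- count-limited replace, including old = "" inserting new once at the front).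
def pvReplace1Chars (s old new : List Char) : List Char :=
  if PySem.Chars.startswith s old = true then new ++ s.drop old.length
  else
    match s with
    | [] => []
    | c :: rest => c :: pvReplace1Chars rest old new
termination_by s.length
decreasing_by simp_all

def pvReplace1 (s old new : String) : String :=
  String.mk (pvReplace1Chars s.toList old.toList new.toList)

-- port of _prefix_fix_raw_label (shared helper of both Python versions)
def pvFixLbl (s0 : String) : String :=
  let s1 := PySem.Str.strip s0
  let s2 := if PySem.Str.startswith s1 "APPEND_" then pvReplace1 s1 "APPEND_" "INSERT_" else s1
  let s3 := if PySem.Str.startswith s2 "REPLACE" && !(PySem.Str.startswith s2 "REPLACE_") then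
              pvReplace1 s2 "REPLACE" "REPLACE_" else s2
  if PySem.Str.startswith s3 "INSERT" && !(PySem.Str.startswith s3 "INSERT_") then
    pvReplace1 s3 "INSERT" "INSERT_" else s3

-- parts = [p.strip() for p in s.split("|") if p.strip()]  (identical line in both Python versions)
def pvPartsOf (s : String) : List String :=
  ((PySem.Str.split? s "|").getD []).filterMap
    (fun p => let q := PySem.Str.strip p; if q ≠ "" then some q else none)

-- A's first loop (REPLACE scan, early return)
def pvLoopReplace : List String → Option String
  | [] => none
  | p :: rest =>
    if PySem.Str.startswith p "REPLACE_" || PySem.Str.startswith p "REPLACE" then some (pvFixLbl p)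
    else pvLoopReplace rest

-- A's second loop (APPEND/INSERT scan, early return)
def pvLoopInsert : List String → Option String
  | [] => none
  | p :: rest =>
    if PySem.Str.startswith p "APPEND_" then some (pvFixLbl p)
    else if PySem.Str.startswith p "INSERT_" || PySem.Str.startswith p "INSERT" then some (pvFixLbl p)
    else pvLoopInsert rest

-- A's code after the split line: two early-return scans, the two membership tests, the fallback
def pvCascadeA (parts : List String) : String :=
  match pvLoopReplace parts with
  | some r => r
  | none =>
    match pvLoopInsert parts with
    | some r => r
    | none =>
      if parts.contains "DELETE" then "DELETE"
      else if parts.contains "KEEP" then "KEEP"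
      else
        match parts with
        | p :: _ => pvFixLbl p
        | [] => ""   -- parts[0] raises IndexError in Python; excluded by Pre_

def collapse_composite_label_py (s : String) : String :=
  if PySem.Str.isIn "|" s = false then s
  else pvCascadeA (pvPartsOf s)

-- ===== PORT B =====

def pvPriority (p : String) : Nat :=
  if PySem.Str.startswith p "REPLACE" then 4
  else if PySem.Str.startswith p "APPEND_" || PySem.Str.startswith p "INSERT" then 3
  else if p = "DELETE" then 2
  else if p = "KEEP" then 1
  else 0

def collapse_composite_label_py_alt (s : String) : String :=
  if PySem.Str.isIn "|" s = false then s
  else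
    match pvPartsOf s with
    | [] => ""   -- parts[0] raises IndexError in Python; excluded by Pre_
    | b :: rest =>
      pvFixLbl (rest.foldl (fun best p => if pvPriority best < pvPriority p then p else best) b)

-- ===== PRECONDITION & SPEC =====
-- Pre_ excludes exactly the inputs where Python raises IndexError: s contains '|' but every
-- pipe-separated piece strips to "" (e.g. "|", " | "); both A and B raise IndexError there.
def Pre_collapse_composite_label_py (s : String) : Prop :=
  PySem.Str.isIn "|" s = true → ∃ p ∈ (PySem.Str.split? s "|").getD [], PySem.Str.strip p ≠ ""
instance (s : String) : Decidable (Pre_collapse_composite_label_py s) := by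
  unfold Pre_collapse_composite_label_py; infer_instance

def pvWitness_collapse_composite_label_py : String := "KEEP | DELETE|INSERTX"

def Spec_collapse_composite_label_py (s : String) (out : String) : Prop :=
  out = collapse_composite_label_py_alt s
instance (s : String) (out : String) : Decidable (Spec_collapse_composite_label_py s out) := by
  unfold Spec_collapse_composite_label_py; infer_instance

-- ===== CLAIM (what is proved, stated in full; the proofs are below) =====
def Claim_equal_collapse_composite_label_py : Prop :=
  ∀ (s : String), Dom_collapse_composite_label_py s → Pre_collapse_composite_label_py s →
    Spec_collapse_composite_label_py s (collapse_composite_label_py s)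

-- ===== LEMMAS AND PROOFS =====

theorem pvPrio_le_four (p : String) : pvPriority p ≤ 4 := by
  unfold pvPriority; split_ifs <;> omega

theorem pvSw_replace_eq (q : String) :
    PySem.Str.startswith q "REPLACE" = decide (4 ≤ pvPriority q) := by
  cases h : PySem.Str.startswith q "REPLACE" with
  | true => simp at h; simp [pvPriority, h]
  | false =>
    simp only [pvPriority, h, Bool.false_eq_true, if_false]
    split_ifs <;> simp

theorem pvSw_trans {p a b : String} (hab : a.toList <+: b.toList)
    (h : PySem.Str.startswith p b = true) : PySem.Str.startswith p a = true := by
  simp only [PySem.Str.startswith_eq, PySem.Chars.startswith_iff] at h ⊢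
  exact hab.trans h

theorem pvLoopReplace_eq (l : List String) :
    pvLoopReplace l = (l.find? (fun q => PySem.Str.startswith q "REPLACE")).map pvFixLbl := by
  induction l with
  | nil => rfl
  | cons p rest ih =>
    simp only [pvLoopReplace, List.find?_cons]
    cases h : PySem.Str.startswith p "REPLACE" with
    | true => simp [h]
    | false =>
      have h' : PySem.Str.startswith p "REPLACE_" = false := by
        cases hc : PySem.Str.startswith p "REPLACE_" with
        | false => rfl
        | true => exact absurd (pvSw_trans (p := p) (a := "REPLACE") (b := "REPLACE_") (by decide) hc) (by rw [h]; simp)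
      simp at h h'
      simp [h, h', ih]

theorem pvLoopInsert_eq (l : List String) :
    pvLoopInsert l = (l.find? (fun q =>
      PySem.Str.startswith q "APPEND_" || PySem.Str.startswith q "INSERT")).map pvFixLbl := by
  induction l with
  | nil => rfl
  | cons p rest ih =>
    simp only [pvLoopInsert, List.find?_cons]
    cases ha : PySem.Str.startswith p "APPEND_" with
    | true => simp [ha]
    | false =>
      cases hi : PySem.Str.startswith p "INSERT" with
      | true => simp [ha, hi]
      | false =>
        have h' : PySem.Str.startswith p "INSERT_" = false := by
          cases hc : PySem.Str.startswith p "INSERT_" with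
          | false => rfl
          | true => exact absurd (pvSw_trans (p := p) (a := "INSERT") (b := "INSERT_") (by decide) hc) (by rw [hi]; simp)
        simp at ha hi h'
        simp [ha, hi, h', ih]

theorem pvFind?_congr_mem {α : Type} {p q : α → Bool} :
    ∀ (l : List α), (∀ a ∈ l, p a = q a) → l.find? p = l.find? q
  | [], _ => rfl
  | a :: l, h => by
    have ha := h a (by simp)
    simp only [List.find?_cons, ha]
    cases q a
    · exact pvFind?_congr_mem l (fun b hb => h b (by simp [hb]))
    · rfl

theorem pvFold_le (l : List String) :
    ∀ (b q : String), q ∈ b :: l →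
      pvPriority q ≤ pvPriority (l.foldl (fun best p => if pvPriority best < pvPriority p then p else best) b) := by
  induction l with
  | nil => intro b q hq; simp at hq; subst hq; simp [List.foldl]
  | cons p rest ih =>
    intro b q hq
    simp only [List.foldl_cons]
    have hstep : pvPriority b ≤ pvPriority (if pvPriority b < pvPriority p then p else b) ∧
        pvPriority p ≤ pvPriority (if pvPriority b < pvPriority p then p else b) := by
      split_ifs with h <;> omega
    rcases List.mem_cons.mp hq with h1 | h1
    · subst h1
      exact le_trans hstep.1 (ih _ _ (by simp))
    · rcases List.mem_cons.mp h1 with h2 | h2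
      · subst h2
        exact le_trans hstep.2 (ih _ _ (by simp))
      · exact ih _ _ (by simp [h2])

theorem pvFold_find (l : List String) :
    ∀ (b : String),
      (b :: l).find? (fun q => decide (pvPriority (l.foldl (fun best p => if pvPriority best < pvPriority p then p else best) b) ≤ pvPriority q))
        = some (l.foldl (fun best p => if pvPriority best < pvPriority p then p else best) b) := by
  induction l with
  | nil => intro b; simp [List.find?_cons]
  | cons p rest ih =>
    intro b
    simp only [List.foldl_cons]
    by_cases hbp : pvPriority b < pvPriority p
    · -- accumulator becomes p; b cannot satisfy the predicate
      have hple : pvPriority p ≤ pvPriority (rest.foldl (fun best p => if pvPriority best < pvPriority p then p else best) p) :=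
        pvFold_le rest p p (by simp)
      have hb : (decide (pvPriority (rest.foldl (fun best p => if pvPriority best < pvPriority p then p else best) p) ≤ pvPriority b)) = false := by
        simp; omega
      simp only [if_pos hbp, List.find?_cons, hb]
      exact ih p
    · -- accumulator stays b
      have ihb := ih b
      simp only [if_neg hbp]
      by_cases hb : (decide (pvPriority (rest.foldl (fun best p => if pvPriority best < pvPriority p then p else best) b) ≤ pvPriority b)) = true
      · have : (b :: rest).find? (fun q => decide (pvPriority (rest.foldl (fun best p => if pvPriority best < pvPriority p then p else best) b) ≤ pvPriority q)) = some b := by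
          simp [List.find?_cons, hb]
        have hrb : (rest.foldl (fun best p => if pvPriority best < pvPriority p then p else best) b) = b := by
          rw [ihb] at this; exact Option.some_inj.mp this
        simp [List.find?_cons, hb, hrb]
      · have hbf : (decide (pvPriority (rest.foldl (fun best p => if pvPriority best < pvPriority p then p else best) b) ≤ pvPriority b)) = false := by
          revert hb; cases (decide (pvPriority (rest.foldl (fun best p => if pvPriority best < pvPriority p then p else best) b) ≤ pvPriority b)) <;> simp
        have hpf : (decide (pvPriority (rest.foldl (fun best p => if pvPriority best < pvPriority p then p else best) b) ≤ pvPriority p)) = false := by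
          simp at hbf ⊢; omega
        have hrest : rest.find? (fun q => decide (pvPriority (rest.foldl (fun best p => if pvPriority best < pvPriority p then p else best) b) ≤ pvPriority q))
            = some (rest.foldl (fun best p => if pvPriority best < pvPriority p then p else best) b) := by
          have := ihb
          simp only [List.find?_cons, hbf] at this
          exact this
        simp [List.find?_cons, hbf, hpf, hrest]

theorem pvPrio_eq_two {p : String} (h : pvPriority p = 2) : p = "DELETE" := by
  unfold pvPriority at h; split_ifs at h with h1 h2 h3 h4 <;> first | exact h3 | omega

theorem pvPrio_eq_one {p : String} (h : pvPriority p = 1) : p = "KEEP" := by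
  unfold pvPriority at h; split_ifs at h with h1 h2 h3 h4 <;> first | exact h4 | omega

theorem pvAppins_eq {q : String} (hle : pvPriority q ≤ 3) :
    (PySem.Str.startswith q "APPEND_" || PySem.Str.startswith q "INSERT") = decide (3 ≤ pvPriority q) := by
  unfold pvPriority at hle ⊢
  split_ifs with h1 h2 <;> simp_all

-- A's whole post-split cascade equals fixing the first maximal-priority part (B's fold).
theorem pvCascade_eq (b : String) (l : List String) :
    pvCascadeA (b :: l)
    = pvFixLbl (l.foldl (fun best p => if pvPriority best < pvPriority p then p else best) b) := by
  unfold pvCascadeA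
  set r := l.foldl (fun best p => if pvPriority best < pvPriority p then p else best) b with hr
  have hle : ∀ q ∈ b :: l, pvPriority q ≤ pvPriority r := fun q hq => pvFold_le l b q hq
  have hfind := pvFold_find l b
  rw [← hr] at hfind
  have hmem : r ∈ b :: l := List.mem_of_find?_eq_some hfind
  have h4' := pvPrio_le_four r
  by_cases h4 : pvPriority r = 4
  · -- REPLACE loop fires at r
    have : (b :: l).find? (fun q => PySem.Str.startswith q "REPLACE") = some r := by
      rw [pvFind?_congr_mem (b :: l) (fun a _ => pvSw_replace_eq a), ← h4]
      exact hfind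
    rw [pvLoopReplace_eq, this]
    rfl
  · have hrepl_none : pvLoopReplace (b :: l) = none := by
      rw [pvLoopReplace_eq]
      have : (b :: l).find? (fun q => PySem.Str.startswith q "REPLACE") = none := by
        rw [List.find?_eq_none]
        intro x hx hc
        have := hle x hx
        rw [pvSw_replace_eq] at hc
        simp at hc
        omega
      rw [this]; rfl
    rw [hrepl_none]
    by_cases h3 : pvPriority r = 3
    · -- INSERT/APPEND loop fires at r
      have : (b :: l).find? (fun q => PySem.Str.startswith q "APPEND_" || PySem.Str.startswith q "INSERT") = some r := by
        rw [pvFind?_congr_mem (b :: l) (fun a ha => pvAppins_eq (by have := hle a ha; omega)), ← h3]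
        exact hfind
      rw [pvLoopInsert_eq, this]
      rfl
    · have hins_none : pvLoopInsert (b :: l) = none := by
        rw [pvLoopInsert_eq]
        have : (b :: l).find? (fun q => PySem.Str.startswith q "APPEND_" || PySem.Str.startswith q "INSERT") = none := by
          rw [List.find?_eq_none]
          intro x hx hc
          have hx3 : pvPriority x ≤ 3 := by have := hle x hx; omega
          rw [pvAppins_eq hx3] at hc
          have := hle x hx
          simp at hc
          omega
        rw [this]; rfl
      rw [hins_none]
      by_cases h2 : pvPriority r = 2
      · have hrD : r = "DELETE" := pvPrio_eq_two h2
        have : (b :: l).contains "DELETE" = true := by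
          rw [List.contains_iff_exists_mem_beq]
          exact ⟨r, hmem, by rw [hrD]; simp⟩
        rw [this, hrD, show pvFixLbl "DELETE" = "DELETE" from by decide]
        simp
      · have hnD : (b :: l).contains "DELETE" = false := by
          by_contra hc
          have hcT : (b :: l).contains "DELETE" = true := by
            cases h : (b :: l).contains "DELETE" with
            | true => rfl
            | false => exact absurd h hc
          have : "DELETE" ∈ b :: l := by
            rcases List.contains_iff_exists_mem_beq.mp hcT with ⟨x, hx, hbeq⟩
            rw [beq_iff_eq.mp hbeq]
            exact hx
          have := hle "DELETE" this
          have hD : pvPriority "DELETE" = 2 := by decide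
          omega
        by_cases h1 : pvPriority r = 1
        · have hrK : r = "KEEP" := pvPrio_eq_one h1
          have : (b :: l).contains "KEEP" = true := by
            rw [List.contains_iff_exists_mem_beq]
            exact ⟨r, hmem, by rw [hrK]; simp⟩
          rw [hnD, this, hrK, show pvFixLbl "KEEP" = "KEEP" from by decide]
          simp
        · have hnK : (b :: l).contains "KEEP" = false := by
            by_contra hc
            have hcT : (b :: l).contains "KEEP" = true := by
              cases h : (b :: l).contains "KEEP" with
              | true => rfl
              | false => exact absurd h hc
            have : "KEEP" ∈ b :: l := by
              rcases List.contains_iff_exists_mem_beq.mp hcT with ⟨x, hx, hbeq⟩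
              rw [beq_iff_eq.mp hbeq]
              exact hx
            have := hle "KEEP" this
            have hK : pvPriority "KEEP" = 1 := by decide
            omega
          -- all priorities are 0: the fold returns the head
          have h0 : pvPriority r = 0 := by omega
          have hrb : r = b := by
            have hb' : (decide (pvPriority r ≤ pvPriority b)) = true := by simp; omega
            have : (b :: l).find? (fun q => decide (pvPriority r ≤ pvPriority q)) = some b := by
              simp [List.find?_cons, hb']
            rw [hfind] at this
            exact Option.some_inj.mp this
          simp at hnD hnK
          simp [hnD, hnK, hrb]

-- ===== VERDICT (by name: the statement is the Claim_ definition above) =====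
set_option maxHeartbeats 1000000 in
theorem collapse_composite_label_py_spec : Claim_equal_collapse_composite_label_py := by
  intro s _ hpre
  unfold Spec_collapse_composite_label_py collapse_composite_label_py collapse_composite_label_py_alt
  cases hin : PySem.Str.isIn "|" s with
  | false => rfl
  | true =>
    have hne : pvPartsOf s ≠ [] := by
      unfold pvPartsOf
      intro hc
      rcases hpre hin with ⟨p, hp, hps⟩
      have h := List.filterMap_eq_nil_iff.mp hc p hp
      simp only at h
      rw [if_pos hps] at h
      exact Option.some_ne_none _ h
    generalize hparts : pvPartsOf s = parts at *
    cases parts with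
    | nil => exact absurd rfl hne
    | cons b l =>
      simp only [Bool.true_eq_false, if_false]
      exact pvCascade_eq b l
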